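-- pv_equiv track=rewrite | github.com/atikul-islam-sajib/alzheimer_classifier_pypi | alzheimer_classifier/metrics.py | _compute_majority_voting
-- ===== SOURCE A (Python) =====
-- from collections import Counter
--
-- def _compute_majority_voting(predicted_label=None):
--     """
--     Compute majority voting for a list of predictions from three models.
--
--     Args:
--         predicted_label (list): A list of predictions from three models.
--
--     Returns:
--         list: A list of majority voting predictions.
--     """
--     voting_predict_labels = []
--
--     for model1_pred, model2_pred, model3_pred in predicted_label:
--         majority_voting = [model1_pred, model2_pred, model3_pred]
--
--         majority_count = Counter(majority_voting)
--         most_common_value = max(majority_count, key=majority_count.get)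
--         voting_predict_labels.append(most_common_value)
--
--     return voting_predict_labels
-- ===== SOURCE B (Python) =====
-- def _compute_majority_voting(predicted_label=None):
--     voting_predict_labels = []
--     for a, b, c in predicted_label:
--         voting_predict_labels.append(a if a == b or a == c else (b if b == c else a))
--     return voting_predict_labels
-- ===== Notes on version B (the rewrite author's own statement) =====
-- stated objective: simpler
-- what changed: Replaces the per-row Counter build and max-by-count scan with three direct equality comparisons exploiting the fixed triple size (ties on all-distinct triples return the first prediction, matching max's insertion-order tie-break).
import Mathlib
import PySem

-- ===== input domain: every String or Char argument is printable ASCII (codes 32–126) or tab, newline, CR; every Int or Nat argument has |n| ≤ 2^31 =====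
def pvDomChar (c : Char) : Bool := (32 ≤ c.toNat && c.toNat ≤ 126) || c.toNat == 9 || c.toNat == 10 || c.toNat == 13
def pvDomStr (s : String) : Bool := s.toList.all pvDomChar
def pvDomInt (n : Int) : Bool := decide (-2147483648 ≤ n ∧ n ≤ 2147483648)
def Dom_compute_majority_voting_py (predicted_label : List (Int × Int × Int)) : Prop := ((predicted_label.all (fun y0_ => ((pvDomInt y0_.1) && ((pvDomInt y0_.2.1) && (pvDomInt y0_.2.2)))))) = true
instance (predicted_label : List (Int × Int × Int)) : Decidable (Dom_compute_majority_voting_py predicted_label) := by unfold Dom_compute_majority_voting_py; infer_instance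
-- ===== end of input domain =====

-- B replaces the per-row Counter + max-by-count with three direct equality comparisons
-- (fixed triple size; all-distinct ties return the first prediction, as max's tie-break does).


-- ===== PORT A =====
def compute_majority_voting_py (predicted_label : List (Int × Int × Int)) : List Int :=
  predicted_label.foldl (fun voting_predict_labels row =>
    let majority_voting : List Int := [row.1, row.2.1, row.2.2]
    let majority_count : PySem.Dict Int Int := PySem.Dict.counter majority_voting
    -- Python's max over the dict's keys with key = count; '.getD 0' is unreachable
    -- (the key list of a 3-element Counter is never empty, where max would raise).
    let most_common_value : Int :=
      (PySem.List.max? majority_count.keys (fun k => majority_count.getD k 0)).getD 0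
    voting_predict_labels ++ [most_common_value]) []

-- ===== PORT B =====
def pvMajority3 (a b c : Int) : Int :=
  if a = b ∨ a = c then a else if b = c then b else a

def compute_majority_voting_py_alt (predicted_label : List (Int × Int × Int)) : List Int :=
  predicted_label.foldl (fun acc row => acc ++ [pvMajority3 row.1 row.2.1 row.2.2]) []

-- ===== PRECONDITION & SPEC =====
def Spec_compute_majority_voting_py (predicted_label : List (Int × Int × Int)) (out : List Int) : Prop := out = compute_majority_voting_py_alt predicted_label
instance (predicted_label : List (Int × Int × Int)) (out : List Int) : Decidable (Spec_compute_majority_voting_py predicted_label out) := by unfold Spec_compute_majority_voting_py; infer_instance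

-- ===== CLAIM (what is proved, stated in full; the proofs are below) =====
def Claim_equal_compute_majority_voting_py : Prop := ∀ (predicted_label : List (Int × Int × Int)), Dom_compute_majority_voting_py predicted_label → Spec_compute_majority_voting_py predicted_label (compute_majority_voting_py predicted_label)

-- ===== LEMMAS AND PROOFS =====

lemma pvRow_eq (a b c : Int) :
    (PySem.List.max? (PySem.Set.ofList [a, b, c])
      (fun k => ((List.count k [a, b, c] : Nat) : Int))).getD 0 = pvMajority3 a b c := by
  unfold pvMajority3
  by_cases hab : a = b <;> by_cases hac : a = c <;> by_cases hbc : b = c <;>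
    simp_all [PySem.Set.ofList, PySem.Set.add, PySem.Set.contains, PySem.List.max?,
      List.count_cons, List.foldl] <;>
    split_ifs <;> simp_all <;> omega

theorem compute_majority_voting_py_spec : Claim_equal_compute_majority_voting_py := by
  intro l _
  unfold Spec_compute_majority_voting_py compute_majority_voting_py compute_majority_voting_py_alt
  simp only [PySem.List.foldl_append_singleton_eq_map, List.nil_append,
    PySem.Dict.keys_counter, PySem.Dict.getD_counter]
  exact List.map_congr_left (fun row _ => pvRow_eq row.1 row.2.1 row.2.2)
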